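-- pv_equiv track=rewrite | github.com/MiguelRiosT/tone-trace | src/audio_analyzer.py | _comparar_hashes
-- ===== SOURCE A (Python) =====
-- def _comparar_hashes(hashes1, hashes2):
--     """
--     Compara dos conjuntos de hashes para encontrar coincidencias.
--
--     ALGORITMO DE COINCIDENCIA TEMPORAL:
--     ==================================
--
--     El algoritmo de Shazam no solo cuenta coincidencias de hashes,
--     sino que busca ALINEACIONES TEMPORALES consistentes.
--
--     PROCESO:
--     1. Por cada hash coincidente entre las dos canciones
--     2. Calcular el desplazamiento temporal: offset = t2 - t1
--     3. Contar cuántos hashes tienen el MISMO desplazamiento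
--     4. El desplazamiento más frecuente indica la mejor alineación
--     5. El score es el número de hashes alineados temporalmente
--
--     INTERPRETACIÓN:
--     - Si dos canciones son iguales, la mayoría de hashes tendrán el mismo offset
--     - Si son diferentes, los offsets serán aleatorios (pocas coincidencias por offset)
--     - El offset más frecuente indica dónde una canción aparece dentro de la otra
--
--     Args:
--         hashes1: Lista de (hash, tiempo) de la primera canción
--         hashes2: Lista de (hash, tiempo) de la segunda canción
--
--     Returns:
--         Score de similitud (número máximo de hashes con offset consistente)
--     """
--     coincidencias = []  # Lista de desplazamientos temporales
--
--     # Búsqueda de hashes coincidentes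
--     for hash1, offset1 in hashes1:
--         for hash2, offset2 in hashes2:
--             if hash1 == hash2:  # Hash coincidente encontrado
--                 # Calcular desplazamiento temporal
--                 desplazamiento_temporal = offset2 - offset1
--                 coincidencias.append(desplazamiento_temporal)
--
--     if not coincidencias:
--         return 0  # No hay coincidencias
--
--     # Contar frecuencia de cada desplazamiento
--     from collections import Counter
--     diff_counter = Counter(coincidencias)
--
--     # El score es la frecuencia del desplazamiento más común
--     # Esto indica cuántos hashes están temporalmente alineados
--     return max(diff_counter.values())
-- ===== SOURCE B (Python) =====
-- from collections import Counter
--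
--
-- def _comparar_hashes(hashes1, hashes2):
--     # Join hashes1 against a dict index of hashes2 keyed by hash,
--     # counting offset differences incrementally (no all-pairs scan).
--     index = {}
--     for h, t in hashes2:
--         index.setdefault(h, []).append(t)
--     counts = Counter()
--     for h, t1 in hashes1:
--         for t2 in index.get(h, []):
--             counts[t2 - t1] += 1
--     return max(counts.values(), default=0)
-- ===== Notes on version B (the rewrite author's own statement) =====
-- stated objective: alternative
-- what changed: Replaces the all-pairs scan of hashes2 by a one-pass dict index of hashes2 keyed by hash, joining hashes1 against it and counting offset differences incrementally with a running Counter, with max(..., default=0) instead of the emptiness branch.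
import Mathlib
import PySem

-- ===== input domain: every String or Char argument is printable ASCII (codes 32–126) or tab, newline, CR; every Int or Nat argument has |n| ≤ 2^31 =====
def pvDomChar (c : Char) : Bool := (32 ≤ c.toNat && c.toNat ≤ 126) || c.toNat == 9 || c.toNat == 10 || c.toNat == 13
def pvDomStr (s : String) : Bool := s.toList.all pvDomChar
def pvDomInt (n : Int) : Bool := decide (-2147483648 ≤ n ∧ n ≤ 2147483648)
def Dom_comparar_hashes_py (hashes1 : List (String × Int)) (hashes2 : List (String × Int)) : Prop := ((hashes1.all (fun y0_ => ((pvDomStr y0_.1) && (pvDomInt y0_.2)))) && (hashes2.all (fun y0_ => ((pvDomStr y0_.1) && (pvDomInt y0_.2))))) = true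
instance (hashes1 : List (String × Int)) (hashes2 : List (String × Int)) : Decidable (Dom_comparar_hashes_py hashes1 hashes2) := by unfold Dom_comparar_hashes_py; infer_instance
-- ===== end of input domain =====

-- B joins hashes1 against a dict index of hashes2 keyed by hash and counts offset differences incrementally (objective: alternative).

-- ===== PORT A =====
def comparar_hashes_py (hashes1 : List (String × Int)) (hashes2 : List (String × Int)) : Int :=
  -- nested loops collecting offset differences for matching hashes
  let coincidencias : List Int :=
    hashes1.foldl (fun acc p =>
      hashes2.foldl (fun acc q =>
        if p.1 == q.1 then acc ++ [q.2 - p.2] else acc) acc) []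
  if coincidencias.isEmpty then 0
  else
    let diff_counter := PySem.Dict.counter coincidencias
    -- Python's max on a list guarded nonempty; max? is some here, .getD 0 unreachable
    (PySem.List.max? diff_counter.values (fun v => v)).getD 0

-- ===== PORT B =====
def comparar_hashes_py_alt (hashes1 : List (String × Int)) (hashes2 : List (String × Int)) : Int :=
  -- index.setdefault(h, []).append(t)  ==  modify h [] (· ++ [t])
  let index : PySem.Dict String (List Int) :=
    hashes2.foldl (fun d p => d.modify p.1 [] (fun ts => ts ++ [p.2])) PySem.Dict.empty
  let counts : PySem.Dict Int Int :=
    hashes1.foldl (fun c p =>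
      (index.getD p.1 []).foldl (fun c t2 => c.modify (t2 - p.2) 0 (· + 1)) c)
      PySem.Dict.empty
  PySem.List.maxD counts.values (fun v => v) 0

-- ===== PRECONDITION & SPEC =====
def Spec_comparar_hashes_py (hashes1 : List (String × Int)) (hashes2 : List (String × Int)) (out : Int) : Prop := out = comparar_hashes_py_alt hashes1 hashes2
instance (hashes1 : List (String × Int)) (hashes2 : List (String × Int)) (out : Int) : Decidable (Spec_comparar_hashes_py hashes1 hashes2 out) := by unfold Spec_comparar_hashes_py; infer_instance

-- ===== CLAIM (what is proved, stated in full; the proofs are below) =====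
def Claim_equal_comparar_hashes_py : Prop := ∀ (hashes1 : List (String × Int)) (hashes2 : List (String × Int)), Dom_comparar_hashes_py hashes1 hashes2 → Spec_comparar_hashes_py hashes1 hashes2 (comparar_hashes_py hashes1 hashes2)

-- ===== LEMMAS AND PROOFS =====

-- the multiset of offset differences, as a flatMap
def pvDiffs (hashes1 : List (String × Int)) (hashes2 : List (String × Int)) : List Int :=
  hashes1.flatMap (fun p => (hashes2.filter (fun q => p.1 == q.1)).map (fun q => q.2 - p.2))

-- A's nested append loop produces exactly pvDiffs
theorem pvA_list_eq (hashes1 hashes2 : List (String × Int)) :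
    hashes1.foldl (fun acc p =>
      hashes2.foldl (fun acc q =>
        if p.1 == q.1 then acc ++ [q.2 - p.2] else acc) acc) []
    = pvDiffs hashes1 hashes2 := by
  unfold pvDiffs
  simp only [PySem.List.foldl_append_if, PySem.List.foldl_append_eq_flatMap]
  simp

-- B's counting loop builds Counter(pvDiffs …)
theorem pvB_counts_eq (hashes1 hashes2 : List (String × Int)) :
    (hashes1.foldl (fun c p =>
      (((hashes2.foldl (fun d p => d.modify p.1 [] (fun ts => ts ++ [p.2]))
          PySem.Dict.empty)).getD p.1 []).foldl
        (fun c t2 => c.modify (t2 - p.2) 0 (· + 1)) c)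
      PySem.Dict.empty)
    = PySem.Dict.counter (pvDiffs hashes1 hashes2) := by
  rw [PySem.Dict.counter_eq_foldl]
  unfold pvDiffs
  rw [List.foldl_flatMap]
  apply PySem.List.foldl_congr_mem
  intro acc p _
  rw [PySem.Dict.getD_foldl_modify_append, PySem.Dict.getD_empty, List.nil_append]
  have hf : hashes2.filter (fun q => q.1 == p.1) = hashes2.filter (fun q => p.1 == q.1) :=
    List.filter_congr (fun q _ => Bool.beq_comm ..)
  simp only [List.foldl_map]
  rw [hf]

theorem comparar_hashes_py_eq (hashes1 hashes2 : List (String × Int)) :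
    comparar_hashes_py hashes1 hashes2 = comparar_hashes_py_alt hashes1 hashes2 := by
  simp only [comparar_hashes_py, comparar_hashes_py_alt]
  rw [pvA_list_eq, pvB_counts_eq]
  by_cases h : pvDiffs hashes1 hashes2 = []
  · simp [h, PySem.List.maxD]
    decide
  · simp [List.isEmpty_eq_false_iff.mpr h, PySem.List.maxD]

-- ===== VERDICT (by name: the statement is the Claim_ definition above) =====
theorem comparar_hashes_py_spec : Claim_equal_comparar_hashes_py := by
  intro hashes1 hashes2 _
  exact comparar_hashes_py_eq hashes1 hashes2
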